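-- pv_equiv track=rewrite | github.com/Navnathjadhav08/Python-Programming | assignments/assignment2_10.py | SumDigi
-- ===== SOURCE A (Python) =====
-- def SumDigi(No):
--      Cnt = 0
--      Sum = 0
--      i = 0
--      while(No>0):
--         i = No%10
--         No=No//10
--         Cnt = Cnt + 1
--         Sum = Sum+i
--      return Sum
-- ===== SOURCE B (Python) =====
-- def SumDigi(No):
--     if No <= 0:
--         return 0
--     return No % 10 + SumDigi(No // 10)
-- ===== Notes on version B (the rewrite author's own statement) =====
-- stated objective: simpler
-- what changed: Replaces the while-loop with three mutable accumulators by a two-line recursion over the same digit recurrence, dropping the dead Cnt counter.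
import Mathlib
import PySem

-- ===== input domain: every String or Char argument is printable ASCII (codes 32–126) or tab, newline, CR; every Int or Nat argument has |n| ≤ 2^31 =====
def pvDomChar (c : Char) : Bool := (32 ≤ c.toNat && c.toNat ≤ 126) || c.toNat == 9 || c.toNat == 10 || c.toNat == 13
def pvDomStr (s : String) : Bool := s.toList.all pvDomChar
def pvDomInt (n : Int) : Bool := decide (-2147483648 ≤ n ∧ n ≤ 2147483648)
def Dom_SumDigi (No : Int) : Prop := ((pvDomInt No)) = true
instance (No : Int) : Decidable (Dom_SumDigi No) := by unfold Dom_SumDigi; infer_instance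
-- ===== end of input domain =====

-- B replaces A's while-loop with three mutable accumulators by a two-line recursion
-- on the same digit recurrence, dropping the dead Cnt counter (objective: simpler).

-- ===== PORT A =====
-- the while-loop of A, state (No, Cnt, Sum, i) as in the Python
def SumDigiLoopA (No Cnt Sum i : Int) : Int :=
  if 0 < No then
    SumDigiLoopA (PySem.Int.floordiv No 10) (Cnt + 1)
      (Sum + PySem.Int.mod No 10) (PySem.Int.mod No 10)
  else Sum
termination_by No.toNat
decreasing_by
  rw [PySem.Int.floordiv_eq_ediv_of_pos (by norm_num)]
  omega

def SumDigi (No : Int) : Int := SumDigiLoopA No 0 0 0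

-- ===== PORT B =====
def SumDigi_alt (No : Int) : Int :=
  if No ≤ 0 then 0
  else PySem.Int.mod No 10 + SumDigi_alt (PySem.Int.floordiv No 10)
termination_by No.toNat
decreasing_by
  rw [PySem.Int.floordiv_eq_ediv_of_pos (by norm_num)]
  omega

-- ===== PRECONDITION & SPEC =====
def Spec_SumDigi (No : Int) (out : Int) : Prop := out = SumDigi_alt No
instance (No : Int) (out : Int) : Decidable (Spec_SumDigi No out) := by unfold Spec_SumDigi; infer_instance

-- ===== CLAIM (what is proved, stated in full; the proofs are below) =====
def Claim_equal_SumDigi : Prop := ∀ (No : Int), Dom_SumDigi No → Spec_SumDigi No (SumDigi No)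

-- ===== LEMMAS AND PROOFS =====
theorem SumDigiLoopA_eq (No Cnt Sum i : Int) :
    SumDigiLoopA No Cnt Sum i = Sum + SumDigi_alt No := by
  rw [SumDigiLoopA, SumDigi_alt]
  by_cases h : 0 < No
  · rw [if_pos h, if_neg (by omega),
      SumDigiLoopA_eq (PySem.Int.floordiv No 10)]
    ring
  · rw [if_neg h, if_pos (by omega)]
    ring
termination_by No.toNat
decreasing_by
  rw [PySem.Int.floordiv_eq_ediv_of_pos (by norm_num)]
  omega

-- ===== VERDICT (by name: the statement is the Claim_ definition above) =====
theorem SumDigi_spec : Claim_equal_SumDigi := by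
  intro No _
  unfold Spec_SumDigi SumDigi
  rw [SumDigiLoopA_eq]
  ring
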